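-- pv_equiv track=rewrite | github.com/A-Wroblewski/Python-Udemy | Exercicios/EX08_checar_se_string_repete_letras.py | check_repeated_letters
-- ===== SOURCE A (Python) =====
-- def check_repeated_letters(word):
--     stored_letters = set()
--
--     for letter in word:
--         if letter not in stored_letters:
--             stored_letters.add(letter)
--
--         else:
--             return 'This word has repeated letters.'
--
--     return 'This word has no repeated letters.'
-- ===== SOURCE B (Python) =====
-- def check_repeated_letters(word):
--     if len(set(word)) < len(word):
--         return 'This word has repeated letters.'
--     return 'This word has no repeated letters.'
-- ===== Notes on version B (the rewrite author's own statement) =====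
-- stated objective: simpler
-- what changed: Replaced the incremental membership loop with an early return by building the character set once and comparing its size to the string length.
import Mathlib
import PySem

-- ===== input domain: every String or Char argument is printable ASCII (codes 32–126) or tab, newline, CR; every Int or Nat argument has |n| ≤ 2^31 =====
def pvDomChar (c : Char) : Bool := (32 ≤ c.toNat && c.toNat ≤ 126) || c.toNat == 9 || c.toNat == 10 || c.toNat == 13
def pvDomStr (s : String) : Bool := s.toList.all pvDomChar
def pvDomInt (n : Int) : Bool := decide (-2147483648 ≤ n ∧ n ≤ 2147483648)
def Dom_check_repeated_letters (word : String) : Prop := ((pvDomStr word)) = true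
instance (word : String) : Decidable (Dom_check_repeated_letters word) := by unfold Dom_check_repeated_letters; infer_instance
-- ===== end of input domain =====

-- B builds the character set once and compares its size with the string length,
-- instead of A's incremental membership loop with an early return (objective: simpler).

-- ===== PORT A =====
-- 'for letter in word: if letter not in stored_letters: add else: return …'
def checkLoopA (stored_letters : PySem.Set Char) : List Char → String
  | [] => "This word has no repeated letters."
  | letter :: rest =>
      if ¬ (PySem.Set.contains stored_letters letter = true) then
        checkLoopA (PySem.Set.add stored_letters letter) rest
      else
        "This word has repeated letters."

def check_repeated_letters (word : String) : String :=
  checkLoopA PySem.Set.empty word.toList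

-- ===== PORT B =====
def check_repeated_letters_alt (word : String) : String :=
  if PySem.Set.len (PySem.Set.ofList word.toList) < PySem.Str.len word then
    "This word has repeated letters."
  else
    "This word has no repeated letters."

-- ===== PRECONDITION & SPEC =====
def Spec_check_repeated_letters (word : String) (out : String) : Prop := out = check_repeated_letters_alt word
instance (word : String) (out : String) : Decidable (Spec_check_repeated_letters word out) := by unfold Spec_check_repeated_letters; infer_instance

-- ===== CLAIM (what is proved, stated in full; the proofs are below) =====
def Claim_equal_check_repeated_letters : Prop := ∀ (word : String), Dom_check_repeated_letters word → Spec_check_repeated_letters word (check_repeated_letters word)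

-- ===== LEMMAS AND PROOFS =====

lemma foldl_add_length_le (l : List Char) (s : PySem.Set Char) :
    (l.foldl PySem.Set.add s).length ≤ s.length + l.length := by
  induction l generalizing s with
  | nil => simp
  | cons c rest ih =>
    simp only [List.foldl_cons, List.length_cons]
    refine le_trans (ih _) ?_
    have : (PySem.Set.add s c).length ≤ s.length + 1 := by
      by_cases h : c ∈ s
      · rw [PySem.Set.add_of_mem h]; omega
      · rw [PySem.Set.add_of_not_mem h]; simp
    omega

lemma checkLoopA_eq (l : List Char) (s : PySem.Set Char) :
    checkLoopA s l =
      if (l.foldl PySem.Set.add s).length < s.length + l.length then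
        "This word has repeated letters."
      else
        "This word has no repeated letters." := by
  induction l generalizing s with
  | nil => simp [checkLoopA]
  | cons c rest ih =>
    by_cases h : c ∈ s
    · have hc : PySem.Set.contains s c = true := (PySem.Set.contains_iff s c).mpr h
      have hle := foldl_add_length_le rest s
      simp only [checkLoopA, hc, not_true, List.foldl_cons, List.length_cons,
        PySem.Set.add_of_mem h, if_false]
      rw [if_pos (by omega)]
    · have hc : ¬ PySem.Set.contains s c = true := fun hh => h ((PySem.Set.contains_iff s c).mp hh)
      simp only [checkLoopA, List.foldl_cons, List.length_cons]
      rw [if_pos hc, ih]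
      simp only [PySem.Set.add_of_not_mem h, List.length_append, List.length_cons,
        List.length_nil]
      congr 1
      simp only [eq_iff_iff]
      omega

-- ===== VERDICT (by name: the statement is the Claim_ definition above) =====
theorem check_repeated_letters_spec : Claim_equal_check_repeated_letters := by
  intro word _
  show check_repeated_letters word = check_repeated_letters_alt word
  unfold check_repeated_letters check_repeated_letters_alt
  rw [checkLoopA_eq]
  have hof : PySem.Set.ofList word.toList = word.toList.foldl PySem.Set.add PySem.Set.empty :=
    PySem.Set.ofList_eq_foldl _
  simp only [PySem.Set.len, PySem.Str.len, ← hof]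
  congr 1
  simp only [eq_iff_iff, PySem.Set.empty, List.length_nil, Nat.zero_add]
  constructor <;> intro hlt
  · exact_mod_cast hlt
  · exact_mod_cast hlt
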